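-- pv_equiv track=rewrite | github.com/Kyzard0/Praticas-SO | E-S/sstf.py | calcular_menor_distancia
-- ===== SOURCE A (Python) =====
-- import math
--
-- def calcular_menor_distancia(posicao_atual, requisicoes):
--
--
--     menor = int(math.fabs(posicao_atual - max(requisicoes))) + 1
--     indice_menor = -1
--
--
--     for indice, requisicao in enumerate(requisicoes):
--         distancia = int(math.fabs(requisicao - posicao_atual))
--         if distancia < menor:
--             menor = distancia
--             indice_menor = indice
--
--     return indice_menor
-- ===== SOURCE B (Python) =====
-- import math
--
-- def calcular_menor_distancia(posicao_atual, requisicoes):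
--     distancias = [int(math.fabs(r - posicao_atual)) for r in requisicoes]
--     return distancias.index(min(distancias))
-- ===== Notes on version B (the rewrite author's own statement) =====
-- stated objective: simpler
-- what changed: Replaces A's sentinel-initialised single accumulator loop (seeded with the distance to max(requisicoes) plus one) by three staged passes: build the truncated-distance table, take min of the table, return the table's first index of that minimum.
import Mathlib
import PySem

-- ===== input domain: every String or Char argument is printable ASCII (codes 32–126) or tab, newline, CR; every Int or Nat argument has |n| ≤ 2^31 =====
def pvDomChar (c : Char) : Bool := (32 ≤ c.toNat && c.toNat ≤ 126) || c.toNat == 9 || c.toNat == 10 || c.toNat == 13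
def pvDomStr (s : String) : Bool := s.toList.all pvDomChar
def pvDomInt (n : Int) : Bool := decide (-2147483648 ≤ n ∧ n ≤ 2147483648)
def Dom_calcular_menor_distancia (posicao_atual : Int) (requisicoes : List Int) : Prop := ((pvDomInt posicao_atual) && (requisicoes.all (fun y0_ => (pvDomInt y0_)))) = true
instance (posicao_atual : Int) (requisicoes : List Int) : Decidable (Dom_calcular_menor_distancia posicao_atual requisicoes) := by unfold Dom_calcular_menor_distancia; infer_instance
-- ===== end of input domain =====

-- B replaces A's sentinel-initialised accumulator loop by three staged passes
-- (distance table, min of the table, first index of that min); return values only.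

-- ===== PORT A =====
-- int(math.fabs(x)) = |x| exactly for |x| < 2^53, which holds on Dom (|args| ≤ 2^31).
def calcular_menor_distancia (posicao_atual : Int) (requisicoes : List Int) : Int :=
  match PySem.List.max? requisicoes (fun y => y) with
  | none => -1  -- max([]) raises ValueError; excluded by Pre_
  | some mx =>
    let init : Int × Int := (((posicao_atual - mx).natAbs : Int) + 1, -1)
    ((PySem.List.enumerate requisicoes 0).foldl
      (fun acc q =>
        let distancia : Int := ((q.2 - posicao_atual).natAbs : Int)
        if distancia < acc.1 then (distancia, q.1) else acc) init).2

-- ===== PORT B =====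
def calcular_menor_distancia_alt (posicao_atual : Int) (requisicoes : List Int) : Int :=
  let distancias := requisicoes.map (fun r => ((r - posicao_atual).natAbs : Int))
  match PySem.List.min? distancias (fun y => y) with
  | none => -1  -- min([]) raises ValueError; excluded by Pre_
  | some m =>
    match PySem.List.index? distancias m with
    | some k => (k : Int)
    | none => -1  -- list.index raises ValueError; unreachable: the min is a member

-- ===== PRECONDITION & SPEC =====
-- A raises ValueError (max of an empty sequence) on the empty list; B's min raises there too.
def Pre_calcular_menor_distancia (posicao_atual : Int) (requisicoes : List Int) : Prop :=
  requisicoes ≠ []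
instance (posicao_atual : Int) (requisicoes : List Int) : Decidable (Pre_calcular_menor_distancia posicao_atual requisicoes) := by unfold Pre_calcular_menor_distancia; infer_instance

def pvWitness_calcular_menor_distancia : Int × List Int := (5, [1, 8, 3])

def Spec_calcular_menor_distancia (posicao_atual : Int) (requisicoes : List Int) (out : Int) : Prop := out = calcular_menor_distancia_alt posicao_atual requisicoes
instance (posicao_atual : Int) (requisicoes : List Int) (out : Int) : Decidable (Spec_calcular_menor_distancia posicao_atual requisicoes out) := by unfold Spec_calcular_menor_distancia; infer_instance

-- ===== CLAIM (what is proved, stated in full; the proofs are below) =====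
def Claim_equal_calcular_menor_distancia : Prop := ∀ (posicao_atual : Int) (requisicoes : List Int), Dom_calcular_menor_distancia posicao_atual requisicoes → Pre_calcular_menor_distancia posicao_atual requisicoes → Spec_calcular_menor_distancia posicao_atual requisicoes (calcular_menor_distancia posicao_atual requisicoes)

-- ===== LEMMAS AND PROOFS =====

-- common specification: (minimum value, index of its FIRST occurrence)
def bestFrom : List Int → Option (Int × Nat)
  | [] => none
  | x :: t =>
    match bestFrom t with
    | none => some (x, 0)
    | some (m, k) => if x ≤ m then some (x, 0) else some (m, k + 1)

theorem bestFrom_cons (x : Int) (t : List Int) :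
    bestFrom (x :: t) =
      match bestFrom t with
      | none => some (x, 0)
      | some (m, k) => if x ≤ m then some (x, 0) else some (m, k + 1) := rfl

-- A's loop body on (index, distance) pairs
def stepA (acc : Int × Int) (q : Int × Int) : Int × Int :=
  if q.2 < acc.1 then (q.2, q.1) else acc

theorem bestFrom_isSome (d : List Int) (hd : d ≠ []) : ∃ m k, bestFrom d = some (m, k) := by
  cases d with
  | nil => exact absurd rfl hd
  | cons x t =>
    rw [bestFrom_cons]
    cases bestFrom t with
    | none => exact ⟨x, 0, rfl⟩
    | some p =>
      by_cases h : x ≤ p.1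
      · exact ⟨x, 0, by simp [h]⟩
      · exact ⟨p.1, p.2 + 1, by simp [h]⟩

theorem bestFrom_le {d : List Int} {m : Int} {k : Nat} {x : Int}
    (hx : x ∈ d) (hb : bestFrom d = some (m, k)) : m ≤ x := by
  induction d generalizing m k with
  | nil => simp at hx
  | cons y t ih =>
    rw [bestFrom_cons] at hb
    rcases List.mem_cons.mp hx with rfl | hmem
    · cases ht : bestFrom t with
      | none => rw [ht] at hb; simp at hb; omega
      | some p =>
        rw [ht] at hb
        by_cases h : x ≤ p.1 <;> simp [h] at hb <;> omega
    · cases ht : bestFrom t with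
      | none =>
        obtain ⟨m', k', h'⟩ := bestFrom_isSome t (by rintro rfl; simp at hmem)
        rw [h'] at ht; exact absurd ht (by simp)
      | some p =>
        rw [ht] at hb
        have hle := ih hmem (m := p.1) (k := p.2) ht
        by_cases h : y ≤ p.1 <;> simp [h] at hb <;> omega

-- A's fold over the enumerated distances, fully characterised by bestFrom
theorem foldA_eq (d : List Int) : ∀ (s m j : Int),
    (PySem.List.enumerate d s).foldl stepA (m, j) =
      match bestFrom d with
      | none => (m, j)
      | some (mn, k) => if mn < m then (mn, s + (k : Int)) else (m, j) := by
  induction d with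
  | nil => intro s m j; simp [PySem.List.enumerate_nil, bestFrom]
  | cons x t ih =>
    intro s m j
    rw [PySem.List.enumerate_cons, List.foldl_cons, bestFrom_cons]
    show (PySem.List.enumerate t (s + 1)).foldl stepA (stepA (m, j) (s, x)) = _
    cases ht : bestFrom t with
    | none =>
      by_cases h : x < m <;>
        simp [stepA, h, ih (s + 1), ht]
    | some p =>
      obtain ⟨mt, kt⟩ := p
      by_cases h : x < m
      · simp only [stepA, if_pos h, ih (s + 1), ht]
        by_cases hx : x ≤ mt
        · have hnx : ¬ mt < x := by omega
          simp [hx, hnx, h]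
        · have h1 : mt < x := by omega
          have h2 : mt < m := by omega
          simp only [if_neg hx, if_pos h1, if_pos h2, Prod.mk.injEq, true_and]
          push_cast; ring
      · simp only [stepA, if_neg h, ih (s + 1), ht]
        by_cases hx : x ≤ mt
        · have h1 : ¬ mt < m := by omega
          simp [hx, h1, h]
        · by_cases h3 : mt < m
          · simp only [if_neg hx, if_pos h3, Prod.mk.injEq, true_and]
            push_cast; ring
          · simp [hx, h3]

-- the enumerate of a mapped list
theorem enumerate_map (g : Int → Int) (xs : List Int) : ∀ (s : Int),
    PySem.List.enumerate (xs.map g) s =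
      (PySem.List.enumerate xs s).map (fun q => (q.1, g q.2)) := by
  induction xs with
  | nil => intro s; simp [PySem.List.enumerate_nil]
  | cons x t ih => intro s; simp [PySem.List.enumerate_cons, ih]

-- running min fold = value of bestFrom
theorem foldl_min_eq (t : List Int) : ∀ (x : Int),
    t.foldl min x = match bestFrom t with | none => x | some (m, _) => min x m := by
  induction t with
  | nil => intro x; simp [bestFrom]
  | cons y t ih =>
    intro x
    rw [List.foldl_cons, ih (min x y), bestFrom_cons]
    cases ht : bestFrom t with
    | none => simp
    | some p =>
      by_cases h : y ≤ p.1 <;>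
        simp only [h, if_pos, if_neg, not_false_iff] <;>
        simp [min_def] <;> split_ifs <;> omega

theorem min?_eq_bestFrom (d : List Int) :
    PySem.List.min? d (fun y => y) = Option.map Prod.fst (bestFrom d) := by
  cases d with
  | nil => simp [bestFrom, PySem.List.min?]
  | cons x t =>
    rw [PySem.List.min?_id_cons, foldl_min_eq t x, bestFrom_cons]
    cases ht : bestFrom t with
    | none => simp
    | some p =>
      by_cases h : x ≤ p.1 <;>
        simp [h, min_def]

theorem index?_eq_bestFrom {d : List Int} {m : Int} {k : Nat}
    (hb : bestFrom d = some (m, k)) : PySem.List.index? d m = some k := by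
  induction d generalizing m k with
  | nil => simp [bestFrom] at hb
  | cons x t ih =>
    rw [bestFrom_cons] at hb
    cases ht : bestFrom t with
    | none =>
      rw [ht] at hb; simp at hb
      obtain ⟨rfl, rfl⟩ := hb
      exact PySem.List.index?_cons_self ..
    | some p =>
      obtain ⟨mt, kt⟩ := p
      rw [ht] at hb
      by_cases h : x ≤ mt
      · simp [h] at hb
        obtain ⟨rfl, rfl⟩ := hb
        exact PySem.List.index?_cons_self ..
      · simp [h] at hb
        obtain ⟨rfl, rfl⟩ := hb
        have hne : x ≠ mt := by omega
        rw [PySem.List.index?_cons_of_ne t hne, ih ht]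
        rfl

-- ===== VERDICT (by name: the statement is the Claim_ definition above) =====
theorem calcular_menor_distancia_spec : Claim_equal_calcular_menor_distancia := by
  intro p req _ hpre
  unfold Spec_calcular_menor_distancia
  cases hmax : PySem.List.max? req (fun y => y) with
  | none => exact absurd ((PySem.List.max?_eq_none_iff req _).mp hmax) hpre
  | some mx =>
    obtain ⟨mn, kn, hb⟩ :=
      bestFrom_isSome (req.map (fun r => ((r - p).natAbs : Int))) (by simpa using hpre)
    have hmn_lt : mn < ((p - mx).natAbs : Int) + 1 := by
      have hmem : ((mx - p).natAbs : Int) ∈ req.map (fun r => ((r - p).natAbs : Int)) :=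
        List.mem_map_of_mem (PySem.List.max?_mem hmax)
      have := bestFrom_le hmem hb
      omega
    have hBv : calcular_menor_distancia_alt p req = (kn : Int) := by
      show (match PySem.List.min? (req.map (fun r => ((r - p).natAbs : Int))) (fun y => y) with
            | none => (-1 : Int)
            | some m =>
              match PySem.List.index? (req.map (fun r => ((r - p).natAbs : Int))) m with
              | some k => (k : Int)
              | none => -1) = (kn : Int)
      rw [min?_eq_bestFrom, hb]
      show (match PySem.List.index? (req.map (fun r => ((r - p).natAbs : Int))) mn with
            | some k => (k : Int)
            | none => (-1 : Int)) = (kn : Int)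
      rw [index?_eq_bestFrom hb]
    have hAv : calcular_menor_distancia p req = (kn : Int) := by
      simp only [calcular_menor_distancia, hmax]
      show ((PySem.List.enumerate req 0).foldl
        (fun acc q =>
          let distancia : Int := ((q.2 - p).natAbs : Int)
          if distancia < acc.1 then (distancia, q.1) else acc)
        (((p - mx).natAbs : Int) + 1, -1)).2 = (kn : Int)
      have hfold : (PySem.List.enumerate req 0).foldl
          (fun acc q =>
            let distancia : Int := ((q.2 - p).natAbs : Int)
            if distancia < acc.1 then (distancia, q.1) else acc)
          (((p - mx).natAbs : Int) + 1, -1)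
          = (PySem.List.enumerate (req.map (fun r => ((r - p).natAbs : Int))) 0).foldl
              stepA (((p - mx).natAbs : Int) + 1, -1) := by
        rw [enumerate_map, List.foldl_map]
        rfl
      rw [hfold, foldA_eq _ 0, hb]
      show (if mn < ((p - mx).natAbs : Int) + 1
            then (mn, (0 : Int) + (kn : Int))
            else (((p - mx).natAbs : Int) + 1, (-1 : Int))).2 = (kn : Int)
      rw [if_pos hmn_lt]
      simp
    rw [hAv, hBv]
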